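-- pv_equiv track=rewrite | github.com/kimhs0716/BOJ | 백준/Gold/1407. 2로 몇 번 나누어질까/2로 몇 번 나누어질까.py | naive2
-- ===== SOURCE A (Python) =====
-- def naive2(n):
--     ret = 0
--     for i in range(1, n + 1):
--         cnt = 0
--         while i % 2 == 0:
--             cnt += 1
--             i >>= 1
--         ret += 1 << cnt
--     return ret
-- ===== SOURCE B (Python) =====
-- def naive2(n):
--     # Sum_{i=1..n} 2^(v2(i)) computed in O(log n):
--     # the number of 1 <= i <= n with v2(i) = k is (n >> k) - (n >> (k+1)).
--     ret = 0
--     k = 0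
--     while (n >> k) > 0:
--         ret += (1 << k) * ((n >> k) - (n >> (k + 1)))
--         k += 1
--     return ret
-- ===== Notes on version B (the rewrite author's own statement) =====
-- stated objective: faster
-- what changed: Replaces the per-element trailing-zero while-loop over range(1,n+1) with a closed-form count: for each k, exactly (n>>k)-(n>>(k+1)) numbers in 1..n have 2-adic valuation k, so B sums 2^k times that count over k.
import Mathlib
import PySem

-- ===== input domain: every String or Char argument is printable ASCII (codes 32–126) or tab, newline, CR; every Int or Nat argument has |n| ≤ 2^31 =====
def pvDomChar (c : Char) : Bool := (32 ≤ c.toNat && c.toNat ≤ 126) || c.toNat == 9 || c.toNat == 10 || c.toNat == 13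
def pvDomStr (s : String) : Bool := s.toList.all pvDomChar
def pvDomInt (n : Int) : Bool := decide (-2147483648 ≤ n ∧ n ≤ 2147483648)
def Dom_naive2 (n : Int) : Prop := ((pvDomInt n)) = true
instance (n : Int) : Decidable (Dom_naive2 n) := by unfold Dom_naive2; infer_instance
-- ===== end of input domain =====

-- B replaces A's per-element trailing-zero loop over range(1, n+1) by a closed-form count
-- per valuation k (objective: faster).

-- ===== PORT A =====
-- A's inner `while i % 2 == 0: cnt += 1; i >>= 1`.  The `0 < i` conjunct is a pure
-- termination guard: in A, i comes from range(1, n+1), so i ≥ 1 always.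
def cntLoop (i : Int) (cnt : Int) : Int :=
  if h : 0 < i ∧ PySem.Int.mod i 2 = 0 then cntLoop (i >>> (1 : Nat)) (cnt + 1) else cnt
termination_by i.toNat
decreasing_by
  have h2 : i >>> (1 : Nat) = i / 2 := by rw [Int.shiftRight_eq_div_pow]; norm_num
  rw [h2]; omega

-- `1 << cnt` = 2 ^ cnt (cnt is a count, always ≥ 0)
def naive2 (n : Int) : Int :=
  (PySem.List.pyRange 1 (n + 1) 1).foldl (fun ret i => ret + 2 ^ (cntLoop i 0).toNat) 0

-- ===== PORT B =====
-- Python's `n >> k` is Lean's `n >>> k`; `(1 << k)` = 2 ^ k.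
def altLoop (n : Int) (k : Nat) (ret : Int) : Int :=
  if h : 0 < n >>> k then
    altLoop n (k + 1) (ret + 2 ^ k * (n >>> k - n >>> (k + 1)))
  else ret
termination_by (n >>> k).toNat
decreasing_by
  have h2 : n >>> (k + 1) = (n >>> k) / 2 := by
    rw [Int.shiftRight_eq_div_pow, Int.shiftRight_eq_div_pow, pow_succ]
    push_cast
    rw [← Int.ediv_ediv_of_nonneg (by positivity)]
  rw [h2]
  generalize n >>> k = m at *
  omega

def naive2_alt (n : Int) : Int := altLoop n 0 0

-- ===== PRECONDITION & SPEC =====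
def Spec_naive2 (n : Int) (out : Int) : Prop := out = naive2_alt n
instance (n : Int) (out : Int) : Decidable (Spec_naive2 n out) := by unfold Spec_naive2; infer_instance

-- ===== CLAIM (what is proved, stated in full; the proofs are below) =====
def Claim_equal_naive2 : Prop := ∀ (n : Int), Dom_naive2 n → Spec_naive2 n (naive2 n)

-- ===== LEMMAS AND PROOFS =====

-- 2^(number of trailing zeros of i): the summand A adds for i
def pw (i : Int) : Int := 2 ^ (cntLoop i 0).toNat

-- the mathematical sum both programs compute: T N = Σ_{i=1..N} pw i
def T : Nat → Int
  | 0 => 0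
  | m + 1 => T m + pw ((m : Int) + 1)

theorem shiftOne (i : Int) : i >>> (1 : Nat) = i / 2 := by
  rw [Int.shiftRight_eq_div_pow]; norm_num

theorem cntLoop_shift (i : Int) (cnt : Int) : cntLoop i cnt = cntLoop i 0 + cnt := by
  by_cases h : 0 < i ∧ PySem.Int.mod i 2 = 0
  · rw [cntLoop, dif_pos h]
    conv_rhs => rw [cntLoop, dif_pos h]
    rw [cntLoop_shift (i >>> (1 : Nat)) (cnt + 1), cntLoop_shift (i >>> (1 : Nat)) (0 + 1)]
    ring
  · rw [cntLoop, dif_neg h]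
    conv_rhs => rw [cntLoop, dif_neg h]
    ring
termination_by i.toNat
decreasing_by all_goals (rw [shiftOne]; omega)

theorem cntLoop_nonneg (i : Int) : 0 ≤ cntLoop i 0 := by
  by_cases h : 0 < i ∧ PySem.Int.mod i 2 = 0
  · rw [cntLoop, dif_pos h, cntLoop_shift]
    have := cntLoop_nonneg (i >>> (1 : Nat))
    omega
  · rw [cntLoop, dif_neg h]
termination_by i.toNat
decreasing_by rw [shiftOne]; omega

theorem pw_odd (M : Nat) (h : M % 2 = 1) : pw (M : Int) = 1 := by
  have hm := PySem.Int.mod_natCast M 2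
  norm_cast at hm
  rw [pw, cntLoop, dif_neg (by omega)]
  rfl

theorem pw_even (j : Nat) (hj : 0 < j) : pw ((2 * j : Nat) : Int) = 2 * pw (j : Int) := by
  have hm := PySem.Int.mod_natCast (2 * j) 2
  norm_cast at hm
  have hs : ((2 * j : Nat) : Int) >>> (1 : Nat) = (j : Int) := by
    rw [shiftOne]; push_cast; omega
  rw [pw, cntLoop, dif_pos ⟨by push_cast; omega, by omega⟩, hs, cntLoop_shift, pw]
  have h0 := cntLoop_nonneg (j : Int)
  rw [Int.toNat_add h0 (by norm_num), pow_add]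
  norm_num [mul_comm]

-- the halving recurrence: T M = (#odd ≤ M) + 2 · T (M/2), with #odd ≤ M = M - M/2
theorem T_half : ∀ M : Nat, T M = (M : Int) - ((M / 2 : Nat) : Int) + 2 * T (M / 2) := by
  intro M
  induction M using Nat.strong_induction_on with
  | _ M ih =>
    match M with
    | 0 => simp [T]
    | 1 =>
      have h1 := pw_odd 1 (by norm_num)
      norm_num at h1
      show T 0 + pw ((0 : Int) + 1) = _
      norm_num [T, h1]
    | (M + 2) =>
      have key : pw ((M : Int) + 1) + pw (((M : Int) + 1) + 1)
          = 1 + 2 * pw ((M / 2 + 1 : Nat) : Int) := by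
        rcases Nat.even_or_odd' M with ⟨a, ha | ha⟩
        · -- M = 2a: M+1 odd, M+2 = 2(a+1)
          have h1 : pw ((M : Int) + 1) = 1 := by
            have := pw_odd (M + 1) (by omega)
            push_cast at this; exact this
          have h2 : pw (((M : Int) + 1) + 1) = 2 * pw ((a + 1 : Nat) : Int) := by
            rw [show ((M : Int) + 1) + 1 = ((2 * (a + 1) : Nat) : Int) by push_cast; omega]
            exact pw_even (a + 1) (by omega)
          rw [h1, h2, show M / 2 + 1 = a + 1 by omega]
        · -- M = 2a+1: M+1 = 2(a+1), M+2 odd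
          have h1 : pw ((M : Int) + 1) = 2 * pw ((a + 1 : Nat) : Int) := by
            rw [show (M : Int) + 1 = ((2 * (a + 1) : Nat) : Int) by push_cast; omega]
            exact pw_even (a + 1) (by omega)
          have h2 : pw (((M : Int) + 1) + 1) = 1 := by
            have := pw_odd (M + 2) (by omega)
            push_cast at this
            rw [show ((M : Int) + 1) + 1 = (M : Int) + 2 by ring]
            exact this
          rw [h1, h2, show M / 2 + 1 = a + 1 by omega]
          ring
      have hM2 : (M + 2) / 2 = M / 2 + 1 := by omega
      have hT2 : T (M / 2 + 1) = T (M / 2) + pw ((M / 2 + 1 : Nat) : Int) := by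
        rw [T]; push_cast; ring_nf
      have hTM2 : T (M + 2) = T M + pw ((M : Int) + 1) + pw (((M : Int) + 1) + 1) := by
        show T (M + 1 + 1) = _
        rw [T, T]; push_cast; ring_nf
      rw [hTM2, hM2, hT2, ih M (by omega)]
      have hc : ((M + 2 : Nat) : Int) - ((M / 2 + 1 : Nat) : Int)
          = (M : Int) - ((M / 2 : Nat) : Int) + 1 := by push_cast; ring
      rw [hc]
      omega

theorem shiftSucc (n : Int) (k : Nat) : n >>> (k + 1) = (n >>> k) / 2 := by
  rw [Int.shiftRight_eq_div_pow, Int.shiftRight_eq_div_pow, pow_succ]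
  push_cast
  rw [← Int.ediv_ediv_of_nonneg (by positivity)]

theorem altLoop_eq (n : Int) (k : Nat) (ret : Int) :
    altLoop n k ret = ret + 2 ^ k * T (n >>> k).toNat := by
  by_cases h : 0 < n >>> k
  · rw [altLoop, dif_pos h, altLoop_eq n (k + 1)]
    set m := n >>> k with hm
    have hM : ((m.toNat : Int)) = m := Int.toNat_of_nonneg (le_of_lt h)
    have hsh : n >>> (k + 1) = m / 2 := shiftSucc n k
    have hcast : n >>> (k + 1) = ((m.toNat / 2 : Nat) : Int) := by rw [hsh]; omega
    have hhalf : (n >>> (k + 1)).toNat = m.toNat / 2 := by rw [hsh]; omega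
    rw [hhalf, hcast, T_half m.toNat, hM, pow_succ]
    ring
  · rw [altLoop, dif_neg h]
    have h0 : (n >>> k).toNat = 0 := by omega
    rw [h0]
    simp [T]
termination_by (n >>> k).toNat
decreasing_by rw [shiftSucc]; omega

theorem foldA (N : Nat) (ret : Int) :
    (PySem.List.pyRange 1 ((N : Int) + 1) 1).foldl (fun ret i => ret + 2 ^ (cntLoop i 0).toNat) ret
      = ret + T N := by
  induction N generalizing ret with
  | zero =>
      rw [PySem.List.pyRange_one_eq_nil (by norm_num)]
      simp [T]
  | succ m ih =>
      have hb : (((m + 1 : Nat) : Int) + 1) = ((m : Int) + 1) + 1 := by push_cast; ring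
      rw [hb, PySem.List.pyRange_one_succ_right (by omega), List.foldl_append, ih]
      show ret + T m + 2 ^ (cntLoop ((m : Int) + 1) 0).toNat = ret + T (m + 1)
      rw [T]
      have hp : pw ((m : Int) + 1) = 2 ^ (cntLoop ((m : Int) + 1) 0).toNat := rfl
      omega

-- ===== VERDICT (by name: the statement is the Claim_ definition above) =====
theorem naive2_spec : Claim_equal_naive2 := by
  intro n _
  show naive2 n = naive2_alt n
  rw [naive2_alt, altLoop_eq n 0 0, Int.shiftRight_zero]
  by_cases hn : n ≤ 0
  · rw [naive2, PySem.List.pyRange_one_eq_nil (by omega)]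
    have h0 : n.toNat = 0 := by omega
    rw [h0]
    simp [T]
  · have hN : n + 1 = ((n.toNat : Nat) : Int) + 1 := by omega
    rw [naive2, hN, foldA n.toNat 0]
    ring
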